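-- pv_equiv track=rewrite | github.com/IBM/kbqa-relation-linking | GenRL/src/opennre/model/ranking_nn.py | process_relation_name
-- ===== SOURCE A (Python) =====
-- def process_relation_name(relation):
--
--     rel_info = relation.split(':')
--
--     rel_name = rel_info[1]
--     rel_words = []
--     start = 0
--     for i in range(len(rel_name)):
--         if (rel_name[i] >= 'A' and rel_name[i] <= 'Z'):
--             rel_words.append(rel_name[start:i])
--             start = i
--         elif rel_name[i] == '/':
--             rel_words.append(rel_name[start:i])
--             start = i + 1
--
--     rel_words.append(rel_name[start:])
--
--     return ' '.join(rel_words).lower()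
-- ===== SOURCE B (Python) =====
-- def process_relation_name(relation):
--     rel_name = relation.split(':')[1]
--     return ''.join(
--         ' ' if c == '/' else (' ' + c.lower() if 'A' <= c <= 'Z' else c.lower())
--         for c in rel_name)
-- ===== Notes on version B (the rewrite author's own statement) =====
-- stated objective: simpler
-- what changed: Replaces the index-based scan that accumulates slice boundaries into a word list and joins/lowercases at the end with a single per-character map (uppercase -> space + lowered char, slash -> space, else lowered char) joined directly into the output.
import Mathlib
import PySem

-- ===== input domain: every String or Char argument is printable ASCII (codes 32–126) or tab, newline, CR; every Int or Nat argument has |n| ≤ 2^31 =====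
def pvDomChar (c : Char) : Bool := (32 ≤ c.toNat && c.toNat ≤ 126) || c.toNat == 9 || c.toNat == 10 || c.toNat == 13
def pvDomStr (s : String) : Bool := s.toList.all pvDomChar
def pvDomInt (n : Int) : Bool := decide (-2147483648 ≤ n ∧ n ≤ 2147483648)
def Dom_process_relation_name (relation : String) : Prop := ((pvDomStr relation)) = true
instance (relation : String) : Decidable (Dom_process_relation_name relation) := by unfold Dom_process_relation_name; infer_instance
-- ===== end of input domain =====

-- B replaces A's boundary-slicing word accumulator with one per-character map joined directly; objective: simpler.

-- ===== PORT A =====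
def process_relation_name (relation : String) : String :=
  let rel_info := PySem.Chars.splitOn relation.toList [':']
  let rel_name := (PySem.List.pyGet? rel_info 1).getD []   -- rel_info[1]; none (IndexError) excluded by Pre_
  let st := (PySem.List.pyRange 0 rel_name.length 1).foldl
    (fun (st : List (List Char) × Int) i =>
      let c := PySem.List.pyGetD rel_name i ' '            -- i is always in range here
      if 'A' ≤ c ∧ c ≤ 'Z' then
        (st.1 ++ [PySem.List.slice rel_name (some st.2) (some i)], i)
      else if c = '/' then
        (st.1 ++ [PySem.List.slice rel_name (some st.2) (some i)], i + 1)
      else st) ([], 0)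
  let rel_words := st.1 ++ [PySem.List.slice rel_name (some st.2) none]
  String.ofList (PySem.Chars.lower (PySem.Chars.join [' '] rel_words))

-- ===== PORT B =====
def process_relation_name_alt (relation : String) : String :=
  let rel_name := (PySem.List.pyGet? (PySem.Chars.splitOn relation.toList [':']) 1).getD []
  String.ofList (rel_name.flatMap (fun c =>
    if c = '/' then [' ']
    else if 'A' ≤ c ∧ c ≤ 'Z' then [' ', PySem.Chars.lowerChar c]
    else [PySem.Chars.lowerChar c]))

-- ===== PRECONDITION & SPEC =====
-- A (and B alike) raise IndexError when relation contains no ':' (split(':')[1] out of range).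
def Pre_process_relation_name (relation : String) : Prop :=
  PySem.Str.isIn ":" relation = true
instance (relation : String) : Decidable (Pre_process_relation_name relation) := by
  unfold Pre_process_relation_name; infer_instance

def pvWitness_process_relation_name : String := "dbo:birthPlace/ofApril"

def Spec_process_relation_name (relation : String) (out : String) : Prop := out = process_relation_name_alt relation
instance (relation : String) (out : String) : Decidable (Spec_process_relation_name relation out) := by unfold Spec_process_relation_name; infer_instance

-- ===== CLAIM (what is proved, stated in full; the proofs are below) =====
def Claim_equal_process_relation_name : Prop := ∀ (relation : String), Dom_process_relation_name relation → Pre_process_relation_name relation → Spec_process_relation_name relation (process_relation_name relation)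

-- ===== LEMMAS AND PROOFS =====

-- A's pre-lowercase per-character contribution
def pvF (c : Char) : List Char :=
  if 'A' ≤ c ∧ c ≤ 'Z' then [' ', c] else if c = '/' then [' '] else [c]

theorem pv_join_append_snoc (ws : List (List Char)) (w x : List Char) :
    PySem.Chars.join [' '] (ws ++ [w ++ x]) = PySem.Chars.join [' '] (ws ++ [w]) ++ x := by
  induction ws with
  | nil => simp [PySem.Chars.join_singleton]
  | cons a ws ih =>
    cases ws with
    | nil => simp [PySem.Chars.join_cons_cons, PySem.Chars.join_singleton]
    | cons b ws =>
      simp only [List.cons_append, PySem.Chars.join_cons_cons]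
      rw [show b :: (ws ++ [w ++ x]) = (b :: ws) ++ [w ++ x] from rfl, ih]
      simp

theorem pv_join_snoc (ws : List (List Char)) (w w2 : List Char) :
    PySem.Chars.join [' '] ((ws ++ [w]) ++ [w2]) =
      PySem.Chars.join [' '] (ws ++ [w]) ++ ' ' :: w2 := by
  induction ws with
  | nil => simp [PySem.Chars.join_cons_cons, PySem.Chars.join_singleton]
  | cons a ws ih =>
    cases ws with
    | nil => simp [PySem.Chars.join_cons_cons, PySem.Chars.join_singleton]
    | cons b ws =>
      simp only [List.cons_append, PySem.Chars.join_cons_cons]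
      rw [show b :: (ws ++ [w] ++ [w2]) = ((b :: ws) ++ [w]) ++ [w2] by simp, ih]
      simp

-- the loop invariant: after the first n indices, joining the words plus the pending
-- slice reproduces the per-character expansion of the first n characters
theorem pv_loop_inv (s : List Char) (n : Nat) (hn : n ≤ s.length) :
    ∃ (ws : List (List Char)) (st : Nat), st ≤ n ∧
      (PySem.List.pyRange 0 (n : Int) 1).foldl
        (fun (st : List (List Char) × Int) i =>
          let c := PySem.List.pyGetD s i ' '
          if 'A' ≤ c ∧ c ≤ 'Z' then
            (st.1 ++ [PySem.List.slice s (some st.2) (some i)], i)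
          else if c = '/' then
            (st.1 ++ [PySem.List.slice s (some st.2) (some i)], i + 1)
          else st) ([], 0) = (ws, (st : Int)) ∧
      PySem.Chars.join [' '] (ws ++ [PySem.List.slice s (some (st : Int)) (some (n : Int))]) =
        (s.take n).flatMap pvF := by
  induction n with
  | zero =>
    refine ⟨[], 0, le_refl _, by simp, ?_⟩
    rw [show ((0 : Nat) : Int) = ((0 : Nat) : Int) from rfl, PySem.List.slice_natCast]
    simp [PySem.Chars.join_singleton]
  | succ n ih =>
    obtain ⟨ws, st, hst, hfold, hjoin⟩ := ih (Nat.le_of_succ_le hn)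
    have hnlt : n < s.length := hn
    have hrange : PySem.List.pyRange 0 ((n + 1 : Nat) : Int) 1 =
        PySem.List.pyRange 0 (n : Int) 1 ++ [(n : Int)] := by
      push_cast
      exact PySem.List.pyRange_one_succ_right (by positivity)
    have hget : PySem.List.pyGetD s ((n : Int)) ' ' = s[n] := by
      rw [PySem.List.pyGetD_natCast]
      simp [List.getD, hnlt]
    have htake : s.take (n + 1) = s.take n ++ [s[n]] := by
      rw [List.take_add_one]; simp [hnlt]
    have hdrop : s.drop n = s[n] :: s.drop (n + 1) := by
      rw [List.drop_eq_getElem_cons hnlt]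
    rw [hrange, List.foldl_append, hfold]
    simp only [List.foldl_cons, List.foldl_nil]
    rw [hget]
    by_cases hup : 'A' ≤ s[n] ∧ s[n] ≤ 'Z'
    · refine ⟨ws ++ [PySem.List.slice s (some (st : Int)) (some (n : Int))], n,
        Nat.le_succ n, by simp [hup], ?_⟩
      have hslice : PySem.List.slice s (some ((n : Nat) : Int)) (some (((n + 1 : Nat)) : Int)) = [s[n]] := by
        rw [PySem.List.slice_natCast, show n + 1 - n = 1 by omega, hdrop,
          List.take_succ_cons, List.take_zero]
      rw [hslice, pv_join_snoc, hjoin, htake, List.flatMap_append]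
      simp [pvF, hup]
    · by_cases hsl : s[n] = '/'
      · refine ⟨ws ++ [PySem.List.slice s (some (st : Int)) (some (n : Int))], n + 1,
          le_refl _, by push_cast; simp [hsl], ?_⟩
        have hslice : PySem.List.slice s (some ((n + 1 : Nat) : Int)) (some ((n + 1 : Nat) : Int)) = [] := by
          rw [PySem.List.slice_natCast]; simp
        rw [hslice, pv_join_snoc, hjoin, htake, List.flatMap_append]
        simp [pvF, hsl]
      · refine ⟨ws, st, Nat.le_succ_of_le hst, by simp [hup, hsl], ?_⟩
        have hidx : (s.drop st)[n - st]? = some s[n] := by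
          rw [List.getElem?_drop, show st + (n - st) = n by omega]
          exact List.getElem?_eq_getElem hnlt
        have hslice : PySem.List.slice s (some ((st : Nat) : Int)) (some ((n + 1 : Nat) : Int)) =
            PySem.List.slice s (some ((st : Nat) : Int)) (some ((n : Nat) : Int)) ++ [s[n]] := by
          rw [PySem.List.slice_natCast, PySem.List.slice_natCast,
            show n + 1 - st = (n - st) + 1 by omega, List.take_add_one, hidx]
          rfl
        rw [hslice, pv_join_append_snoc, hjoin, htake, List.flatMap_append]
        simp [pvF, hup, hsl]

theorem pv_lower_flat (s : List Char) :
    List.map PySem.Chars.lowerChar (s.flatMap pvF) =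
      s.flatMap (fun c =>
        if c = '/' then [' ']
        else if 'A' ≤ c ∧ c ≤ 'Z' then [' ', PySem.Chars.lowerChar c]
        else [PySem.Chars.lowerChar c]) := by
  induction s with
  | nil => simp
  | cons c s ih =>
    simp only [List.flatMap_cons, List.map_append, ih]
    congr 1
    by_cases hsl : c = '/'
    · subst hsl; decide
    · by_cases hup : 'A' ≤ c ∧ c ≤ 'Z'
      · simp [pvF, hup, hsl, show PySem.Chars.lowerChar ' ' = ' ' from by decide]
      · simp [pvF, hup, hsl]

-- ===== VERDICT (by name: the statement is the Claim_ definition above) =====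
theorem process_relation_name_spec : Claim_equal_process_relation_name := by
  intro relation _ _
  unfold Spec_process_relation_name process_relation_name process_relation_name_alt
  dsimp only
  set s : List Char := (PySem.List.pyGet? (PySem.Chars.splitOn relation.toList [':']) 1).getD [] with hs
  obtain ⟨ws, st, hle, hfold, hjoin⟩ := pv_loop_inv s s.length le_rfl
  rw [List.take_length] at hjoin
  rw [hfold]
  dsimp only
  have hfull : PySem.List.slice s (some (st : Int)) none =
      PySem.List.slice s (some (st : Int)) (some ((s.length : Nat) : Int)) := by
    rw [PySem.List.slice_from_natCast, PySem.List.slice_natCast]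
    rw [List.take_of_length_le (by simp)]
  rw [hfull, hjoin]
  simp only [PySem.Chars.lower]
  rw [pv_lower_flat]
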